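-- pv_equiv track=rewrite | github.com/StoneCotton/TransferBox | src/core/config_manager.py | _is_valid_date_format
-- ===== SOURCE A (Python) =====
-- def _is_valid_date_format(format_string):
--     """
--     Validate a date format string by checking for valid format specifiers.
--
--     Args:
--         format_string: The date format string to validate
--
--     Returns:
--         bool: True if the format is valid, False otherwise
--     """
--     # Set of valid format specifiers for strftime
--     valid_specifiers = {
--         '%a', '%A', '%w', '%d', '%b', '%B', '%m', '%y', '%Y', '%H', '%I', '%p',
--         '%M', '%S', '%f', '%z', '%Z', '%j', '%U', '%W', '%c', '%x', '%X', '%%'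
--     }
--
--     # Check each potential format specifier in the string
--     i = 0
--     while i < len(format_string):
--         if format_string[i] == '%' and i + 1 < len(format_string):
--             # Found a potential format specifier
--             spec = format_string[i:i+2]
--             if spec not in valid_specifiers:
--                 return False
--             i += 2
--         else:
--             # Not a format specifier, just skip
--             i += 1
--
--     return True
-- ===== SOURCE B (Python) =====
-- _SPEC_CHARS = frozenset('aAwdbBmyYHIpMSfzZjUWcxX%')
--
-- def _is_valid_date_format(format_string):
--     # One-pass DFA: 'pending' records that the previous character opened a
--     # format specifier; that character must then be a valid specifier letter
--     # (or '%' itself, for the escaped '%%').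
--     pending = False
--     for ch in format_string:
--         if pending:
--             if ch not in _SPEC_CHARS:
--                 return False
--             pending = False
--         elif ch == '%':
--             pending = True
--     return True
-- ===== Notes on version B (the rewrite author's own statement) =====
-- stated objective: idiomatic
-- what changed: Replaced A's index-stepping scan with two-character lookahead and slice-membership in a set of 2-char strings by a single-pass character DFA: a boolean flag remembers that a specifier was opened, and the following character is checked against a set of allowed specifier letters.
import Mathlib
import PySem

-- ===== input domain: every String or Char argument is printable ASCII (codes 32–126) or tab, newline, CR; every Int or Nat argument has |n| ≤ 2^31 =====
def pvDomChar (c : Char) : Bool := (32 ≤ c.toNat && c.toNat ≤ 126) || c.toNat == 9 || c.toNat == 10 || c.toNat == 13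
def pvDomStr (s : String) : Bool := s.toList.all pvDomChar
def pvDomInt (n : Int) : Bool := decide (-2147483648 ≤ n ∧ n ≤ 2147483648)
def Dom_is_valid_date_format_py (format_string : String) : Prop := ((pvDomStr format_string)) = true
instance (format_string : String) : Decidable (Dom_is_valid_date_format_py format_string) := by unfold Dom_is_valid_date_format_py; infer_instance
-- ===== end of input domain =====

-- B replaces A's two-char-lookahead index-stepping scan by a one-pass DFA over single characters with a 'pending %' flag; same result everywhere.

-- ===== PORT A =====
-- A's set of valid strftime specifiers (Python set of 2-char strings; membership only)
def pvValidSpecifiers : PySem.Set String :=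
  PySem.Set.ofList
    ["%a", "%A", "%w", "%d", "%b", "%B", "%m", "%y", "%Y", "%H", "%I", "%p",
     "%M", "%S", "%f", "%z", "%Z", "%j", "%U", "%W", "%c", "%x", "%X", "%%"]

-- A's while loop: at '%' with a successor char, check the two-char slice and step by 2;
-- otherwise step by 1 — modelled structurally on the char list.
def pvLoopA : List Char → Bool
  | [] => true
  | [_] => true
  | c :: d :: rest =>
    if c = '%' then
      if String.ofList [c, d] ∈ pvValidSpecifiers then pvLoopA rest else false
    else pvLoopA (d :: rest)

def is_valid_date_format_py (format_string : String) : Bool :=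
  pvLoopA format_string.toList

-- ===== PORT B =====
-- Source B's frozenset of the characters allowed right after a '%'
def pvSpecChars : PySem.Set Char :=
  PySem.Set.ofList "aAwdbBmyYHIpMSfzZjUWcxX%".toList

-- Source B's single for loop with the Bool accumulator 'pending'
def pvScanB : Bool → List Char → Bool
  | _, [] => true
  | true, ch :: rest => if ch ∈ pvSpecChars then pvScanB false rest else false
  | false, ch :: rest => if ch = '%' then pvScanB true rest else pvScanB false rest

def is_valid_date_format_py_alt (format_string : String) : Bool :=
  pvScanB false format_string.toList

-- ===== PRECONDITION & SPEC =====
def Spec_is_valid_date_format_py (format_string : String) (out : Bool) : Prop := out = is_valid_date_format_py_alt format_string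
instance (format_string : String) (out : Bool) : Decidable (Spec_is_valid_date_format_py format_string out) := by unfold Spec_is_valid_date_format_py; infer_instance

-- ===== CLAIM =====
def Claim_equal_is_valid_date_format_py : Prop := ∀ (format_string : String), Dom_is_valid_date_format_py format_string → Spec_is_valid_date_format_py format_string (is_valid_date_format_py format_string)

-- ===== LEMMAS AND PROOFS =====
-- '%d' is a valid specifier string iff d is one of the allowed post-'%' characters
theorem pv_spec_mem_iff (d : Char) :
    (String.ofList ['%', d] ∈ pvValidSpecifiers) ↔ d ∈ pvSpecChars := by
  simp [pvValidSpecifiers, pvSpecChars, PySem.Set.ofList, String.ext_iff,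
    String.toList_ofList]

theorem pvLoopA_eq_pvScanB : ∀ (l : List Char), pvLoopA l = pvScanB false l
  | [] => rfl
  | [c] => by by_cases h : c = '%' <;> simp [pvLoopA, pvScanB, h]
  | c :: d :: rest => by
    by_cases h : c = '%'
    · subst h
      by_cases hd : d ∈ pvSpecChars <;>
        simp [pvLoopA, pvScanB, pv_spec_mem_iff, hd, pvLoopA_eq_pvScanB rest]
    · simp [pvLoopA, pvScanB, h, pvLoopA_eq_pvScanB (d :: rest)]
  termination_by l => l.length

-- ===== VERDICT =====
theorem is_valid_date_format_py_spec : Claim_equal_is_valid_date_format_py := by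
  intro s _
  unfold Spec_is_valid_date_format_py is_valid_date_format_py is_valid_date_format_py_alt
  exact pvLoopA_eq_pvScanB s.toList
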